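-- pv_equiv track=rewrite | github.com/Sheroz-Akram/Vivid-Estate | server/backendApplication/Components/SearchingSystem.py | completeWordSearch
-- ===== SOURCE A (Python) =====
-- def completeWordSearch(Search , Text):
--     isFound = False
--     Text = Text.lower()
--     Search = Search.lower()
--     Result = ""
--     for x in Text.split(','):
--         if Search in x:
--             isFound = True
--         if isFound == True:
--             Result += x + ","
--
--     return Result
-- ===== SOURCE B (Python) =====
-- def completeWordSearch(Search, Text):
--     parts = Text.lower().split(',')
--     needle = Search.lower()
--     for i, part in enumerate(parts):
--         if needle in part:
--             return ",".join(parts[i:]) + ","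
--     return ""
-- ===== Notes on version B (the rewrite author's own statement) =====
-- stated objective: simpler
-- what changed: Replaces A's boolean-flag accumulation over every part (building the result with repeated +=) by finding the first matching part's index with enumerate and returning ",".join(parts[i:]) + "," immediately, stopping the scan at the first hit.
import Mathlib
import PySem

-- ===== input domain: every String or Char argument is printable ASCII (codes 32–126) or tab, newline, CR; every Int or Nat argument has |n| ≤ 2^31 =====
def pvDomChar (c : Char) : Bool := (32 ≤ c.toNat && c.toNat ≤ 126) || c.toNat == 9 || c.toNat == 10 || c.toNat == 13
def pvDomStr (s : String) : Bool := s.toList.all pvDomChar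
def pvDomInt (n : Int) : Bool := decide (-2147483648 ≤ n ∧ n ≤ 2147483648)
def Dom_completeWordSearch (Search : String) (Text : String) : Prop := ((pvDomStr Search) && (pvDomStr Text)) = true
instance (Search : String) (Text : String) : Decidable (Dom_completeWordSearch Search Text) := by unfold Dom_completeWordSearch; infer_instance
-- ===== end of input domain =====

-- B replaces A's boolean-flag scan over all parts (building the result with +=) by
-- finding the first matching part's index and returning ",".join(parts[i:]) + "," at once (objective: simpler).

-- ===== PORT A =====
def completeWordSearch (Search : String) (Text : String) : String :=
  let text := PySem.Str.lower Text
  let search := PySem.Str.lower Search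
  -- Text.split(','): the separator is the nonempty literal ",", so split? is always `some`
  let parts := (PySem.Str.split? text ",").getD []
  let st := parts.foldl
    (fun (acc : Bool × String) x =>
      let isFound := if PySem.Str.isIn search x then true else acc.1
      (isFound, if isFound then PySem.Str.join "" [acc.2, x, ","] else acc.2))
    (false, "")
  st.2

-- ===== PORT B =====
def completeWordSearch_alt (Search : String) (Text : String) : String :=
  let parts := (PySem.Str.split? (PySem.Str.lower Text) ",").getD []
  let needle := PySem.Str.lower Search
  match (PySem.List.enumerate parts).find? (fun p => PySem.Str.isIn needle p.2) with
  | some (i, _) =>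
      PySem.Str.join "" [PySem.Str.join "," (PySem.List.slice parts (some i) none), ","]
  | none => ""

-- ===== PRECONDITION & SPEC =====
def Spec_completeWordSearch (Search : String) (Text : String) (out : String) : Prop := out = completeWordSearch_alt Search Text
instance (Search : String) (Text : String) (out : String) : Decidable (Spec_completeWordSearch Search Text out) := by unfold Spec_completeWordSearch; infer_instance

-- ===== CLAIM (what is proved, stated in full; the proofs are below) =====
def Claim_equal_completeWordSearch : Prop := ∀ (Search : String) (Text : String), Dom_completeWordSearch Search Text → Spec_completeWordSearch Search Text (completeWordSearch Search Text)

-- ===== LEMMAS AND PROOFS =====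

-- A's loop step, abstracted over the (lower-cased) search string's membership test
def pvStep (f : String → Bool) (acc : Bool × String) (x : String) : Bool × String :=
  let isFound := if f x then true else acc.1
  (isFound, if isFound then PySem.Str.join "" [acc.2, x, ","] else acc.2)

-- what A appends per remaining part, as a character list
def pvFlat (parts : List String) : List Char :=
  parts.flatMap (fun x => x.toList ++ [','])

lemma toList_join3 (r x : String) :
    (PySem.Str.join "" [r, x, ","]).toList = r.toList ++ x.toList ++ [','] := by
  simp [PySem.Str.toList_join, PySem.Chars.join_cons_cons, PySem.Chars.join_singleton]

lemma toList_join2 (a : String) :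
    (PySem.Str.join "" [a, ","]).toList = a.toList ++ [','] := by
  simp [PySem.Str.toList_join, PySem.Chars.join_cons_cons, PySem.Chars.join_singleton]

-- once the flag is true, the fold appends every remaining part followed by ','
lemma foldl_step_true (f : String → Bool) (parts : List String) (r : String) :
    ((parts.foldl (pvStep f) (true, r)).2).toList = r.toList ++ pvFlat parts := by
  induction parts generalizing r with
  | nil => simp [pvFlat]
  | cons x xs ih =>
      have hstep : pvStep f (true, r) x = (true, PySem.Str.join "" [r, x, ","]) := by
        simp [pvStep]
      simp only [List.foldl_cons, hstep, ih, toList_join3, pvFlat, List.flatMap_cons,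
        List.append_assoc]

-- ",".join of a nonempty list of parts, followed by ',', is exactly A's per-part appends
lemma join_comma_flat (x : String) (xs : List String) :
    PySem.Chars.join [','] ((x :: xs).map String.toList) ++ [','] = pvFlat (x :: xs) := by
  induction xs generalizing x with
  | nil => simp [PySem.Chars.join_singleton, pvFlat]
  | cons y ys ih =>
      rw [List.map_cons, List.map_cons, PySem.Chars.join_cons_cons]
      have h := ih y
      rw [List.map_cons] at h
      simp only [pvFlat, List.flatMap_cons, List.append_assoc] at h ⊢
      rw [h]

-- the main induction: B's first-match branch equals A's flag fold, for any suffix of `full`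
lemma main_ind (f : String → Bool) (full : List String) :
    ∀ (parts : List String) (k : Nat), full.drop k = parts →
    (match (PySem.List.enumerate parts (k : Int)).find? (fun p => f p.2) with
     | some (i, _) =>
         (PySem.Str.join "" [PySem.Str.join "," (PySem.List.slice full (some i) none), ","]).toList
     | none => ([] : List Char))
    = ((parts.foldl (pvStep f) (false, "")).2).toList := by
  intro parts
  induction parts with
  | nil => intro k hk; simp [PySem.List.enumerate]
  | cons x xs ih =>
      intro k hk
      rw [PySem.List.enumerate_cons, List.find?_cons]
      by_cases hfx : f x = true
      · simp only [hfx]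
        have hslice : PySem.List.slice full (some (k : Int)) none = x :: xs := by
          rw [PySem.List.slice_from full (by positivity : (0:Int) ≤ (k:Int))]
          simpa using hk
        have hstep : pvStep f (false, "") x = (true, PySem.Str.join "" ["", x, ","]) := by
          simp [pvStep, hfx]
        have hsep : ("," : String).toList = [','] := rfl
        rw [hslice, List.foldl_cons, hstep, foldl_step_true, toList_join2,
          PySem.Str.toList_join, toList_join3, hsep, join_comma_flat]
        simp [pvFlat]
      · simp only [Bool.not_eq_true] at hfx
        simp only [hfx]
        have hstep : pvStep f (false, "") x = (false, "") := by
          simp [pvStep, hfx]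
        have hk' : full.drop (k + 1) = xs := by
          have h1 : (full.drop k).drop 1 = xs := by rw [hk]; rfl
          simpa [List.drop_drop, Nat.add_comm] using h1
        have h := ih (k + 1) hk'
        push_cast at h ⊢
        rw [List.foldl_cons, hstep]
        exact h

-- ===== VERDICT (by name: the statement is the Claim_ definition above) =====
set_option maxHeartbeats 1000000 in
theorem completeWordSearch_spec : Claim_equal_completeWordSearch := by
  intro S T _
  show completeWordSearch S T = completeWordSearch_alt S T
  rw [← String.toList_inj]
  have hA : completeWordSearch S T
      = (((PySem.Str.split? (PySem.Str.lower T) ",").getD []).foldl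
          (pvStep (fun x => PySem.Str.isIn (PySem.Str.lower S) x)) (false, "")).2 := rfl
  have hB : completeWordSearch_alt S T
      = (match (PySem.List.enumerate ((PySem.Str.split? (PySem.Str.lower T) ",").getD []) 0).find?
            (fun p => PySem.Str.isIn (PySem.Str.lower S) p.2) with
         | some (i, _) =>
             PySem.Str.join "" [PySem.Str.join ","
               (PySem.List.slice ((PySem.Str.split? (PySem.Str.lower T) ",").getD []) (some i) none), ","]
         | none => "") := rfl
  rw [hA, hB]
  have H := main_ind (fun x => PySem.Str.isIn (PySem.Str.lower S) x)
      ((PySem.Str.split? (PySem.Str.lower T) ",").getD [])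
      ((PySem.Str.split? (PySem.Str.lower T) ",").getD []) 0 (by simp)
  simp only [Nat.cast_zero] at H
  cases hfind : (PySem.List.enumerate ((PySem.Str.split? (PySem.Str.lower T) ",").getD []) 0).find?
      (fun p => PySem.Str.isIn (PySem.Str.lower S) p.2) with
  | none =>
      rw [hfind] at H
      exact H.symm
  | some p =>
      obtain ⟨i, x⟩ := p
      rw [hfind] at H
      exact H.symm
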